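-- pv_equiv track=rewrite | github.com/mprpic/commit-editor | src/commit_editor/app.py | _split_content_and_comments
-- ===== SOURCE A (Python) =====
-- def _split_content_and_comments(
--     lines: list[str],
-- ) -> tuple[list[str], list[str]]:
--     """Split lines into content and git comment lines, stripping trailing blanks."""
--     comment_start = len(lines)
--     for i, line in enumerate(lines):
--         if line.startswith("#"):
--             comment_start = i
--             break
--     content = lines[:comment_start]
--     comments = lines[comment_start:]
--     while content and not content[-1].strip():
--         content.pop()
--     return content, comments
-- ===== SOURCE B (Python) =====
-- def _split_content_and_comments(lines):
--     content = []
--     comments = []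
--     pending = []
--     in_comment = False
--     for line in lines:
--         if in_comment:
--             comments.append(line)
--         elif line.startswith("#"):
--             in_comment = True
--             comments.append(line)
--         elif not line.strip():
--             pending.append(line)
--         else:
--             content.extend(pending)
--             pending = []
--             content.append(line)
--     return content, comments
-- ===== Notes on version B (the rewrite author's own statement) =====
-- stated objective: alternative
-- what changed: Replaces A's three phases (index-scan for the first '#' line, two slices, then a pop-from-end while loop) by a single forward pass maintaining content, comments, a pending-blank-lines buffer and an in-comment flag; trailing blanks are trimmed by never flushing the pending buffer.
import Mathlib
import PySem

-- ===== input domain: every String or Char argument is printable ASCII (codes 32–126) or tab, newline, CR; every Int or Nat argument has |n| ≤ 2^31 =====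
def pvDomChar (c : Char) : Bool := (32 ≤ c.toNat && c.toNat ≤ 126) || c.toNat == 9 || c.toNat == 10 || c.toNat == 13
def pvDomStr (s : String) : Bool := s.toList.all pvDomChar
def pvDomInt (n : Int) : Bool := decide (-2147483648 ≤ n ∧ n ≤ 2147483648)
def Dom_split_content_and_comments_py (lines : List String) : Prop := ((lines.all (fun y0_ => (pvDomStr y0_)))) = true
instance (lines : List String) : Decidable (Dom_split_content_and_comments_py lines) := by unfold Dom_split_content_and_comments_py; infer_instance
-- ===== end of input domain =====

-- B replaces A's scan-slice-slice-then-pop-from-end structure by one forward pass with a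
-- pending-blank-lines buffer and an in-comment flag (alternative decomposition, same cost).

-- ===== PORT A =====
-- the for/enumerate loop with break: comment_start starts at len(lines) and becomes i at the first '#'-line
def pvFindStartA (ls : List String) (i : Nat) : Nat :=
  match ls with
  | [] => i
  | l :: rest => if PySem.Str.startswith l "#" then i else pvFindStartA rest (i + 1)

-- the while loop: pop the last element while it strips to empty
def pvTrimA (c : List String) : List String :=
  match h : c.getLast? with
  | none => c
  | some x => if PySem.Str.strip x = "" then pvTrimA c.dropLast else c
termination_by c.length
decreasing_by
  cases c with
  | nil => simp at h
  | cons a as => simp [List.length_dropLast]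

def split_content_and_comments_py (lines : List String) : List String × List String :=
  let comment_start := pvFindStartA lines 0
  let content := PySem.List.slice lines none (some (comment_start : Int))
  let comments := PySem.List.slice lines (some (comment_start : Int)) none
  (pvTrimA content, comments)

-- ===== PORT B =====
-- loop body of Source B: state = (content, comments, pending, in_comment)
def pvStepB (st : List String × List String × List String × Bool) (line : String) :
    List String × List String × List String × Bool :=
  let (content, comments, pending, inc) := st
  if inc then (content, comments ++ [line], pending, inc)
  else if PySem.Str.startswith line "#" then (content, comments ++ [line], pending, true)
  else if PySem.Str.strip line = "" then (content, comments, pending ++ [line], inc)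
  else (content ++ pending ++ [line], comments, [], inc)

def split_content_and_comments_py_alt (lines : List String) : List String × List String :=
  let st := lines.foldl pvStepB ([], [], [], false)
  (st.1, st.2.1)

-- ===== PRECONDITION & SPEC =====
def Spec_split_content_and_comments_py (lines : List String) (out : List String × List String) : Prop := out = split_content_and_comments_py_alt lines
instance (lines : List String) (out : List String × List String) : Decidable (Spec_split_content_and_comments_py lines out) := by unfold Spec_split_content_and_comments_py; infer_instance

-- ===== CLAIM (what is proved, stated in full; the proofs are below) =====
def Claim_equal_split_content_and_comments_py : Prop := ∀ (lines : List String), Dom_split_content_and_comments_py lines → Spec_split_content_and_comments_py lines (split_content_and_comments_py lines)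

-- ===== LEMMAS AND PROOFS =====

-- index of the first line starting with '#' (= its length if none)
def pvIdx : List String → Nat
  | [] => 0
  | l :: ls => if PySem.Str.startswith l "#" then 0 else pvIdx ls + 1

-- head-first characterisation of removing the maximal blank suffix
def pvRtrim : List String → List String
  | [] => []
  | x :: xs =>
    let r := pvRtrim xs
    if r = [] then (if PySem.Str.strip x = "" then [] else [x]) else x :: r

theorem pvFindStartA_eq (ls : List String) (i : Nat) : pvFindStartA ls i = i + pvIdx ls := by
  induction ls generalizing i with
  | nil => simp [pvFindStartA, pvIdx]
  | cons l rest ih =>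
    simp only [pvFindStartA, pvIdx]
    split_ifs <;> simp [ih] <;> omega

theorem pvRtrim_all_blank (p : List String) (h : ∀ x ∈ p, PySem.Str.strip x = "") :
    pvRtrim p = [] := by
  induction p with
  | nil => rfl
  | cons x xs ih =>
    have hx := h x (by simp)
    simp [pvRtrim, ih (fun y hy => h y (by simp [hy])), hx]

theorem pvRtrim_append_blank (xs : List String) (x : String) (h : PySem.Str.strip x = "") :
    pvRtrim (xs ++ [x]) = pvRtrim xs := by
  induction xs with
  | nil => simp [pvRtrim, h]
  | cons y ys ih => simp [pvRtrim, ih]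

theorem pvRtrim_append_nonblank (xs : List String) (x : String) (h : ¬ PySem.Str.strip x = "") :
    pvRtrim (xs ++ [x]) = xs ++ [x] := by
  induction xs with
  | nil => simp [pvRtrim, h]
  | cons y ys ih => simp [pvRtrim, ih]

theorem pvRtrim_middle_nonblank (xs : List String) (l : String) (ys : List String)
    (h : ¬ PySem.Str.strip l = "") :
    pvRtrim (xs ++ l :: ys) = xs ++ l :: pvRtrim ys := by
  induction xs with
  | nil =>
    simp only [List.nil_append, pvRtrim]
    split_ifs with h1 <;> simp [h, h1]
  | cons y zs ih => simp [pvRtrim, ih]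

theorem pvTrimA_eq_rtrim (c : List String) : pvTrimA c = pvRtrim c := by
  induction c using List.reverseRecOn with
  | nil => rw [pvTrimA]; rfl
  | append_singleton xs x ih =>
    rw [pvTrimA]
    split
    · rename_i h; simp at h
    · rename_i y h
      have hy : x = y := by simpa using h
      subst hy
      rw [List.dropLast_concat]
      by_cases hb : PySem.Str.strip x = ""
      · rw [if_pos hb, ih, pvRtrim_append_blank xs x hb]
      · rw [if_neg hb, pvRtrim_append_nonblank xs x hb]

-- the pure recursion computed by Source B's loop in "not yet in comments" mode, with pending buffer p
def pvBRun : List String → List String → List String × List String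
  | [], _ => ([], [])
  | l :: ls, p =>
    if PySem.Str.startswith l "#" then ([], l :: ls)
    else if PySem.Str.strip l = "" then pvBRun ls (p ++ [l])
    else
      let r := pvBRun ls []
      (p ++ l :: r.1, r.2)

theorem foldl_stepB_true (ls : List String) (c cm p : List String) :
    ls.foldl pvStepB (c, cm, p, true) = (c, cm ++ ls, p, true) := by
  induction ls generalizing cm with
  | nil => simp
  | cons l ls ih => simp [pvStepB, ih]

theorem foldl_stepB_false (ls : List String) (c cm p : List String) :
    (ls.foldl pvStepB (c, cm, p, false)).1 = c ++ (pvBRun ls p).1 ∧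
    (ls.foldl pvStepB (c, cm, p, false)).2.1 = cm ++ (pvBRun ls p).2 := by
  induction ls generalizing c cm p with
  | nil => simp [pvBRun]
  | cons l ls ih =>
    by_cases h1 : PySem.Str.startswith l "#"
    · have hs : pvStepB (c, cm, p, false) l = (c, cm ++ [l], p, true) := by
        simp only [pvStepB]
        rw [if_neg (by simp), if_pos h1]
      rw [List.foldl_cons, hs, foldl_stepB_true]
      simp only [pvBRun, if_pos h1]
      simp
    · by_cases h2 : PySem.Str.strip l = ""
      · have hs : pvStepB (c, cm, p, false) l = (c, cm, p ++ [l], false) := by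
          simp only [pvStepB]
          rw [if_neg (by simp), if_neg h1, if_pos h2]
        rw [List.foldl_cons, hs]
        simp only [pvBRun, if_neg h1, if_pos h2]
        exact ih c cm (p ++ [l])
      · have hs : pvStepB (c, cm, p, false) l = (c ++ p ++ [l], cm, [], false) := by
          simp only [pvStepB]
          rw [if_neg (by simp), if_neg h1, if_neg h2]
        rw [List.foldl_cons, hs]
        obtain ⟨ha, hb⟩ := ih (c ++ p ++ [l]) cm []
        refine ⟨?_, ?_⟩
        · rw [ha]; simp only [pvBRun, if_neg h1, if_neg h2]; simp
        · rw [hb]; simp only [pvBRun, if_neg h1, if_neg h2]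
  
theorem pvBRun_eq (ls : List String) (p : List String)
    (hp : ∀ x ∈ p, PySem.Str.strip x = "") :
    pvBRun ls p = (pvRtrim (p ++ ls.take (pvIdx ls)), ls.drop (pvIdx ls)) := by
  induction ls generalizing p with
  | nil => simp [pvBRun, pvIdx, pvRtrim_all_blank p hp]
  | cons l ls ih =>
    simp only [pvBRun, pvIdx]
    split_ifs with h1 h2
    · simp [h1, pvRtrim_all_blank p hp]
    · have hp' : ∀ x ∈ p ++ [l], PySem.Str.strip x = "" := by
        intro x hx
        rcases List.mem_append.mp hx with hx | hx
        · exact hp x hx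
        · simp at hx; simpa [hx]
      rw [ih (p ++ [l]) hp']
      simp [h1, List.take_succ_cons, List.append_assoc]
    · rw [ih [] (by simp)]
      simp [h1, List.take_succ_cons, pvRtrim_middle_nonblank p l _ h2]

-- ===== VERDICT (by name: the statement is the Claim_ definition above) =====
theorem split_content_and_comments_py_spec : Claim_equal_split_content_and_comments_py := by
  intro lines _
  unfold Spec_split_content_and_comments_py split_content_and_comments_py split_content_and_comments_py_alt
  have hfind := pvFindStartA_eq lines 0
  have hf := foldl_stepB_false lines [] [] []
  have hb := pvBRun_eq lines [] (by simp)
  simp only [hfind, Nat.zero_add, PySem.List.slice_to_natCast, PySem.List.slice_from_natCast,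
    pvTrimA_eq_rtrim]
  have h1 := hf.1
  have h2 := hf.2
  rw [hb] at h1 h2
  simp only [List.nil_append] at h1 h2
  exact Prod.ext h1.symm h2.symm
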